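-- pv_equiv track=rewrite | github.com/chicCode/dspstutorial_python-ver | programmers/test.py | solution
-- ===== SOURCE A (Python) =====
-- def solution(answers:list)->list:
--     result = []
--     num1 = [1,2,3,4,5]
--     num2 = [2,1,2,3,2,4,2,5]
--     num3 = [3,3,1,1,2,2,4,4,5,5]
--     score = [0 for _ in range(3)]
--
--     for i, answer in enumerate(answers):
--         if answer == num1[i%len(num1)]:
--             score[0] += 1
--         if answer == num2[i%len(num2)]:
--             score[1] += 1
--         if answer == num3[i%len(num3)]:
--             score[2] += 1
--
--     for i, s in enumerate(score):
--         if s == max(score):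
--             result.append(i+1)
--
--     return result
-- ===== SOURCE B (Python) =====
-- def solution(answers: list) -> list:
--     # Histogram answers once by (position mod 40, value); 40 = lcm(5, 8, 10), so each
--     # pattern's value at position i depends only on i % 40 and its score is a sum of
--     # 40 table lookups instead of a comparison per answer.
--     hist = {}
--     for i, a in enumerate(answers):
--         k = (i % 40, a)
--         hist[k] = hist.get(k, 0) + 1
--     patterns = [[1, 2, 3, 4, 5],
--                 [2, 1, 2, 3, 2, 4, 2, 5],
--                 [3, 3, 1, 1, 2, 2, 4, 4, 5, 5]]
--     score = [sum(hist.get((r, pat[r % len(pat)]), 0) for r in range(40))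
--              for pat in patterns]
--     m = max(score)
--     return [i + 1 for i, s in enumerate(score) if s == m]
-- ===== Notes on version B (the rewrite author's own statement) =====
-- stated objective: alternative
-- what changed: A compares every answer against all three cyclic patterns in one fused counting pass; B instead builds a histogram keyed by (position mod 40, answer) in a single pass (40 = lcm of the three pattern lengths) and then scores each pattern purely from that 40-bucket table, keeping the same winner selection.
import Mathlib
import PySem

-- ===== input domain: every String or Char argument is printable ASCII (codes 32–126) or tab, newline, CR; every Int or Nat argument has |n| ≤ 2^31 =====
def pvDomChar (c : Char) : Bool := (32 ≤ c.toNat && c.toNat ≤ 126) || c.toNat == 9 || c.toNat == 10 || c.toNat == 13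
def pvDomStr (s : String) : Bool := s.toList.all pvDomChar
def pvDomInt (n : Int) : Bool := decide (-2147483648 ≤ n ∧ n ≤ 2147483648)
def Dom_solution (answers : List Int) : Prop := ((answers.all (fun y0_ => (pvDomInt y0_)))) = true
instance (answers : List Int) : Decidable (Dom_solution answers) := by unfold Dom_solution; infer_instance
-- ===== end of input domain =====

-- B replaces A's per-answer three-way comparison pass with a (position mod 40, value) histogram
-- built once and 40 table lookups per pattern (40 = lcm of the pattern lengths); 'alternative', same cost.

-- ===== PORT A =====
-- A: one loop over the answers, incrementing the three pattern counters in lockstep.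
def solution (answers : List Int) : List Int :=
  let num1 : List Int := [1, 2, 3, 4, 5]
  let num2 : List Int := [2, 1, 2, 3, 2, 4, 2, 5]
  let num3 : List Int := [3, 3, 1, 1, 2, 2, 4, 4, 5, 5]
  let score : Int × Int × Int :=
    (PySem.List.enumerate answers).foldl
      (fun s p =>
        (if p.2 == PySem.List.pyGetD num1 (PySem.Int.mod p.1 (PySem.List.len num1)) 0 then s.1 + 1 else s.1,
         if p.2 == PySem.List.pyGetD num2 (PySem.Int.mod p.1 (PySem.List.len num2)) 0 then s.2.1 + 1 else s.2.1,
         if p.2 == PySem.List.pyGetD num3 (PySem.Int.mod p.1 (PySem.List.len num3)) 0 then s.2.2 + 1 else s.2.2))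
      (0, 0, 0)
  let scoreL : List Int := [score.1, score.2.1, score.2.2]
  let m : Int := (PySem.List.max? scoreL (fun x => x)).getD 0   -- max(score); scoreL is nonempty, so the default is never used
  (PySem.List.enumerate scoreL).foldl
    (fun result p => if p.2 == m then result ++ [p.1 + 1] else result) []

-- ===== PORT B =====
-- B: build the (i % 40, answer) histogram in one pass, then score each pattern from the table.
def solution_alt (answers : List Int) : List Int :=
  let hist : PySem.Dict (Int × Int) Int :=
    (PySem.List.enumerate answers).foldl
      (fun d p =>
        d.insert (PySem.Int.mod p.1 40, p.2) (d.getD (PySem.Int.mod p.1 40, p.2) 0 + 1))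
      PySem.Dict.empty
  let patterns : List (List Int) :=
    [[1, 2, 3, 4, 5], [2, 1, 2, 3, 2, 4, 2, 5], [3, 3, 1, 1, 2, 2, 4, 4, 5, 5]]
  let score : List Int := patterns.map (fun pat =>
    ((PySem.List.pyRange 0 40).map (fun r =>
        hist.getD (r, PySem.List.pyGetD pat (PySem.Int.mod r (PySem.List.len pat)) 0) 0)).sum)
  let m : Int := (PySem.List.max? score (fun x => x)).getD 0
  ((PySem.List.enumerate score).filter (fun p => p.2 == m)).map (fun p => p.1 + 1)

-- ===== PRECONDITION & SPEC =====
def Spec_solution (answers : List Int) (out : List Int) : Prop := out = solution_alt answers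
instance (answers : List Int) (out : List Int) : Decidable (Spec_solution answers out) := by unfold Spec_solution; infer_instance

-- ===== CLAIM (what is proved, stated in full; the proofs are below) =====
def Claim_equal_solution : Prop := ∀ (answers : List Int), Dom_solution answers → Spec_solution answers (solution answers)

-- ===== LEMMAS AND PROOFS =====

-- A loop with three independent conditional counters equals the triple of counts.
theorem foldl_triple_count {α : Type} (l : List α) (c1 c2 c3 : α → Bool) (s : Int × Int × Int) :
    l.foldl (fun (s : Int × Int × Int) p =>
        (if c1 p then s.1 + 1 else s.1,
         if c2 p then s.2.1 + 1 else s.2.1,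
         if c3 p then s.2.2 + 1 else s.2.2)) s
    = (s.1 + (l.countP c1 : Int), s.2.1 + (l.countP c2 : Int), s.2.2 + (l.countP c3 : Int)) := by
  induction l generalizing s with
  | nil => simp
  | cons x t ih =>
    simp only [List.foldl_cons, ih, List.countP_cons, Prod.mk.injEq]
    refine ⟨?_, ?_, ?_⟩ <;> split_ifs <;> push_cast <;> omega

-- Within List.range N a test of the form 'r = j (a fixed j < N) and q r' succeeds exactly once iff q j.
theorem countP_range_beq (N j : Nat) (q : Nat → Bool) (hj : j < N) :
    (List.range N).countP (fun r => (j == r) && q r) = if q j then 1 else 0 := by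
  induction N with
  | zero => omega
  | succ N ih =>
    rw [List.range_succ, List.countP_append]
    by_cases h : j = N
    · subst h
      have h0 : (List.range j).countP (fun r => (j == r) && q r) = 0 := by
        apply List.countP_eq_zero.mpr
        intro r hr
        have : r < j := List.mem_range.mp hr
        simp [Nat.ne_of_gt this]
      simp [h0, List.countP_cons]
    · have hjN : j < N := by omega
      have h1 : ([N].countP (fun r => (j == r) && q r)) = 0 := by simp [h]
      rw [ih hjN, h1]
      simp

-- The 0/1-indicator of bucket j, summed over r ∈ range(40), is the indicator of q at bucket j.
theorem indicator_sum (k : Nat) (c : Int) (v : Int → Int) :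
    ((PySem.List.pyRange 0 40).map
        (fun r => if ((PySem.Int.mod (k : Int) 40, c) == (r, v r)) then (1 : Int) else 0)).sum
    = if c == v (PySem.Int.mod (k : Int) 40) then 1 else 0 := by
  have h40 : (40 : Int) = ((40 : Nat) : Int) := by norm_num
  rw [h40, PySem.List.pyRange_zero_natCast, List.map_map]
  have hmod : PySem.Int.mod (k : Int) ((40 : Nat) : Int) = ((k % 40 : Nat) : Int) :=
    PySem.Int.mod_natCast k 40
  rw [hmod]
  have hcond : ∀ r : Nat,
      ((((k % 40 : Nat) : Int), c) == (((r : Nat) : Int), v (r : Int)))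
      = ((k % 40 == r) && (c == v (r : Int))) := by
    intro r
    show (((k % 40 : Nat) : Int) == ((r : Nat) : Int) && (c == v (r : Int)))
      = ((k % 40 == r) && (c == v (r : Int)))
    congr 1
    rw [Bool.eq_iff_iff]
    simp
    omega
  calc ((List.range 40).map
          (fun r => if ((((k % 40 : Nat) : Int), c) == (((r : Nat) : Int), v (r : Int))) then (1 : Int) else 0)).sum
      = ((List.range 40).map
          (fun r => if ((k % 40 == r) && (c == v (r : Int))) then (1 : Int) else 0)).sum := by
        apply congrArg List.sum
        apply List.map_congr_left
        intro r _
        rw [hcond r]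
    _ = ((List.range 40).countP (fun r => (k % 40 == r) && (c == v (r : Int))) : Int) :=
        PySem.List.sum_map_ite_one_zero _ _
    _ = ((if c == v ((k % 40 : Nat) : Int) then 1 else 0 : Nat) : Int) := by
        rw [countP_range_beq 40 (k % 40) (fun r => c == v (r : Int)) (Nat.mod_lt k (by norm_num))]
    _ = if c == v ((k % 40 : Nat) : Int) then 1 else 0 := by
        split <;> simp

-- Bucketed counting: summing the per-bucket counts over range(40) recovers the single countP,
-- provided the classifier v only looks at the index modulo 40.
theorem bucket_sum (l : List (Int × Int)) (v : Int → Int)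
    (hidx : ∀ p ∈ l, ∃ k : Nat, p.1 = (k : Int))
    (hv : ∀ k : Nat, v (PySem.Int.mod (k : Int) 40) = v (k : Int)) :
    ((PySem.List.pyRange 0 40).map
        (fun r => (l.countP (fun p => (PySem.Int.mod p.1 40, p.2) == (r, v r)) : Int))).sum
    = (l.countP (fun p => p.2 == v p.1) : Int) := by
  induction l with
  | nil => simp
  | cons x t ih =>
    obtain ⟨k, hk⟩ := hidx x (List.mem_cons_self)
    have ht : ∀ p ∈ t, ∃ k : Nat, p.1 = (k : Int) := fun p hp => hidx p (List.mem_cons_of_mem _ hp)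
    have hsplit : ((PySem.List.pyRange 0 40).map
        (fun r => (((x :: t).countP (fun p => (PySem.Int.mod p.1 40, p.2) == (r, v r))) : Int))).sum
        = ((PySem.List.pyRange 0 40).map
            (fun r => (t.countP (fun p => (PySem.Int.mod p.1 40, p.2) == (r, v r)) : Int))).sum
          + ((PySem.List.pyRange 0 40).map
              (fun r => if ((PySem.Int.mod x.1 40, x.2) == (r, v r)) then (1 : Int) else 0)).sum := by
      rw [← PySem.List.sum_map_add_int]
      apply congrArg List.sum
      apply List.map_congr_left
      intro r _
      rw [List.countP_cons]
      split <;> push_cast <;> ring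
    rw [hsplit, ih ht, List.countP_cons, hk, indicator_sum k x.2 v, hv k]
    split <;> push_cast <;> ring

-- every index produced by enumerate is a natural number
theorem enumerate_idx_nat {α : Type} (xs : List α) (p : Int × α)
    (hp : p ∈ PySem.List.enumerate xs) : ∃ k : Nat, p.1 = (k : Int) := by
  obtain ⟨k, h, rfl⟩ := (PySem.List.mem_enumerate_iff xs 0 p).mp hp
  exact ⟨k, by simp⟩

-- the pattern value at index i depends only on i % 40, because the pattern length divides 40
theorem patval_mod40 (pat : List Int) (L : Nat) (hlen : (PySem.List.len pat) = (L : Int))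
    (hdvd : L ∣ 40) (k : Nat) :
    PySem.List.pyGetD pat (PySem.Int.mod (PySem.Int.mod (k : Int) 40) (PySem.List.len pat)) 0
    = PySem.List.pyGetD pat (PySem.Int.mod (k : Int) (PySem.List.len pat)) 0 := by
  have h40 : (40 : Int) = ((40 : Nat) : Int) := by norm_num
  rw [hlen, h40, PySem.Int.mod_natCast k 40, PySem.Int.mod_natCast (k % 40) L,
    PySem.Int.mod_natCast k L, Nat.mod_mod_of_dvd k hdvd]

-- B's histogram-based per-pattern score equals A's direct count for that pattern.
theorem hist_score_eq (answers : List Int) (pat : List Int) (L : Nat)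
    (hlen : (PySem.List.len pat) = (L : Int)) (hdvd : L ∣ 40) :
    ((PySem.List.pyRange 0 40).map (fun r =>
        (((PySem.List.enumerate answers).foldl
            (fun d p =>
              d.insert (PySem.Int.mod p.1 40, p.2) (d.getD (PySem.Int.mod p.1 40, p.2) 0 + 1))
            PySem.Dict.empty).getD
          (r, PySem.List.pyGetD pat (PySem.Int.mod r (PySem.List.len pat)) 0) 0))).sum
    = ((PySem.List.enumerate answers).countP
        (fun p => p.2 == PySem.List.pyGetD pat (PySem.Int.mod p.1 (PySem.List.len pat)) 0) : Int) := by
  have hfold : (PySem.List.enumerate answers).foldl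
      (fun d p =>
        d.insert (PySem.Int.mod p.1 40, p.2) (d.getD (PySem.Int.mod p.1 40, p.2) 0 + 1))
      (PySem.Dict.empty : PySem.Dict (Int × Int) Int)
      = (((PySem.List.enumerate answers).map (fun p => (PySem.Int.mod p.1 40, p.2))).foldl
          (fun d x => d.insert x (d.getD x 0 + 1)) (PySem.Dict.empty : PySem.Dict (Int × Int) Int)) := by
    rw [List.foldl_map]
  have hgetD : ∀ v : Int × Int,
      ((((PySem.List.enumerate answers).map (fun p => (PySem.Int.mod p.1 40, p.2))).foldl
          (fun d x => d.insert x (d.getD x 0 + 1)) (PySem.Dict.empty : PySem.Dict (Int × Int) Int)).getD v 0)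
      = (((PySem.List.enumerate answers).countP
            (fun p => (PySem.Int.mod p.1 40, p.2) == v)) : Int) := by
    intro v
    rw [PySem.Dict.getD_foldl_insert_add_one]
    have hemp : (PySem.Dict.empty : PySem.Dict (Int × Int) Int).getD v 0 = 0 := by
      simp [pysem]
    rw [hemp, List.count_eq_countP, List.countP_map]
    simp [Function.comp_def]
  have hstep : ((PySem.List.pyRange 0 40).map (fun r =>
        (((PySem.List.enumerate answers).foldl
            (fun d p =>
              d.insert (PySem.Int.mod p.1 40, p.2) (d.getD (PySem.Int.mod p.1 40, p.2) 0 + 1))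
            PySem.Dict.empty).getD
          (r, PySem.List.pyGetD pat (PySem.Int.mod r (PySem.List.len pat)) 0) 0))).sum
      = ((PySem.List.pyRange 0 40).map (fun r =>
          (((PySem.List.enumerate answers).countP
              (fun p => (PySem.Int.mod p.1 40, p.2)
                == (r, PySem.List.pyGetD pat (PySem.Int.mod r (PySem.List.len pat)) 0))) : Int))).sum := by
    apply congrArg List.sum
    apply List.map_congr_left
    intro r _
    simp only [hfold, hgetD]
  rw [hstep]
  exact bucket_sum (PySem.List.enumerate answers)
    (fun i => PySem.List.pyGetD pat (PySem.Int.mod i (PySem.List.len pat)) 0)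
    (enumerate_idx_nat answers)
    (fun k => patval_mod40 pat L hlen hdvd k)

-- A's append-accumulating winner loop is B's filter-then-map.
theorem winner_loop_eq_filter_map (scoreL : List Int) (m : Int) :
    (PySem.List.enumerate scoreL).foldl
      (fun result p => if p.2 == m then result ++ [p.1 + 1] else result) []
    = ((PySem.List.enumerate scoreL).filter (fun p => p.2 == m)).map (fun p => p.1 + 1) := by
  rw [PySem.List.foldl_append_if]
  simp

-- ===== VERDICT (by name: the statement is the Claim_ definition above) =====
theorem solution_spec : Claim_equal_solution := by
  intro answers _
  unfold Spec_solution solution solution_alt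
  simp only [List.map]
  rw [foldl_triple_count, winner_loop_eq_filter_map,
    hist_score_eq answers [1, 2, 3, 4, 5] 5 (by decide) (by norm_num),
    hist_score_eq answers [2, 1, 2, 3, 2, 4, 2, 5] 8 (by decide) (by norm_num),
    hist_score_eq answers [3, 3, 1, 1, 2, 2, 4, 4, 5, 5] 10 (by decide) (by norm_num)]
  simp
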